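-- pv_equiv track=rewrite | github.com/slackerscpt/AdventofCode2021 | Day03/day3.py | determineNumbers
-- ===== SOURCE A (Python) =====
-- def countOccurances(numbers, position):
--     zero = 0
--     one = 0
--     for values in numbers:
--         if (values[position] == "0"):
--             zero += 1
--         else:
--             one += 1
--
--     return (zero, one)
--
-- def determineNumbers(data):
--     numberList = []
--     for numbers in data:
--         numberList.append(list(numbers))
--
--     position = 0
--     collectionData = {}
--     while (position < len(data[0])):
--         (zero, one ) = countOccurances(data, position)
--         collectionData[position] = (zero, one)
--         position += 1
--
--     return collectionData
-- ===== SOURCE B (Python) =====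
-- def determineNumbers(data):
--     width = len(data[0])
--     counts = [(0, 0)] * width
--     for number in data:
--         counts = [
--             (z + 1, o) if number[pos] == "0" else (z, o + 1)
--             for pos, (z, o) in zip(range(width), counts)
--         ]
--     return dict(enumerate(counts))
-- ===== Notes on version B (the rewrite author's own statement) =====
-- stated objective: alternative
-- what changed: Replaces A's per-position rescan of the whole list (and its unused numberList copy) with a single pass over the numbers that updates a per-position count table, returned via dict(enumerate(...)).
import Mathlib
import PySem

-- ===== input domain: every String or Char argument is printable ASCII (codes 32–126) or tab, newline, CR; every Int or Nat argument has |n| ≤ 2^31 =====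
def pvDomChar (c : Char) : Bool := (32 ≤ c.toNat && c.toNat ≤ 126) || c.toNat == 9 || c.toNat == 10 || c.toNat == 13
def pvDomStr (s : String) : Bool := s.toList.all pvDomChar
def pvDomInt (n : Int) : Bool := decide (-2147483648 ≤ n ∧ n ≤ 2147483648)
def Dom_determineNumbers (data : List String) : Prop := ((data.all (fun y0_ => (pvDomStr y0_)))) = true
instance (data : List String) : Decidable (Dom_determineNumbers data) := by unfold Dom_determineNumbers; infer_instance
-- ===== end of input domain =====

-- B replaces A's per-position rescans of the whole list (and its unused numberList copy)
-- with a single pass over the numbers that updates a per-position count table.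


-- ===== PORT A =====
def pvCountOccurances (numbers : List String) (position : Int) : Int × Int :=
  numbers.foldl
    (fun zo v =>
      if PySem.List.pyGet? v.toList position == some '0' then (zo.1 + 1, zo.2)
      else (zo.1, zo.2 + 1))
    (0, 0)

def determineNumbers (data : List String) : List (Int × Int × Int) :=
  let _numberList := data.map String.toList   -- A builds this list and never uses it
  let L : Int := ((PySem.List.pyGetD data 0 "").toList.length : Int)   -- len(data[0]); Pre_ excludes data = []
  let d := (PySem.List.pyRange 0 L 1).foldl
    (fun (d : PySem.Dict Int (Int × Int)) pos => d.insert pos (pvCountOccurances data pos))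
    PySem.Dict.empty
  d.items

-- ===== PORT B =====
def determineNumbers_alt (data : List String) : List (Int × Int × Int) :=
  let width : Int := ((PySem.List.pyGetD data 0 "").toList.length : Int)
  let init : List (Int × Int) := List.replicate width.toNat (0, 0)
  let counts := data.foldl
    (fun counts number =>
      ((PySem.List.pyRange 0 width 1).zip counts).map
        (fun pc =>
          if PySem.List.pyGet? number.toList pc.1 == some '0' then (pc.2.1 + 1, pc.2.2)
          else (pc.2.1, pc.2.2 + 1)))
    init
  PySem.List.enumerate counts 0

-- ===== PRECONDITION & SPEC =====
-- Pre_ excludes exactly the inputs where the Python A raises IndexError: empty data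
-- (data[0]) and ragged inputs with a row shorter than the first row (values[position]).
def Pre_determineNumbers (data : List String) : Prop :=
  data ≠ [] ∧ ∀ s ∈ data, (data.headD "").toList.length ≤ s.toList.length
instance (data : List String) : Decidable (Pre_determineNumbers data) := by
  unfold Pre_determineNumbers; infer_instance

def pvWitness_determineNumbers : List String := ["0110", "1010", "1111"]

def Spec_determineNumbers (data : List String) (out : List (Int × Int × Int)) : Prop := out = determineNumbers_alt data
instance (data : List String) (out : List (Int × Int × Int)) : Decidable (Spec_determineNumbers data out) := by unfold Spec_determineNumbers; infer_instance

-- ===== CLAIM (what is proved, stated in full; the proofs are below) =====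
def Claim_equal_determineNumbers : Prop := ∀ (data : List String), Dom_determineNumbers data → Pre_determineNumbers data → Spec_determineNumbers data (determineNumbers data)

-- ===== LEMMAS AND PROOFS =====

-- A's per-position count generalized to an arbitrary starting pair
def pvCnt (rows : List String) (start : Int × Int) (pos : Int) : Int × Int :=
  rows.foldl
    (fun zo v =>
      if PySem.List.pyGet? v.toList pos == some '0' then (zo.1 + 1, zo.2)
      else (zo.1, zo.2 + 1))
    start

theorem pvCnt_eq_countOccurances (rows : List String) (pos : Int) :
    pvCountOccurances rows pos = pvCnt rows (0, 0) pos := rfl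

theorem pvEnumerate_map_pyRange (f : Int → Int × Int) (s b : Int) :
    PySem.List.enumerate ((PySem.List.pyRange s b 1).map f) s
      = (PySem.List.pyRange s b 1).map (fun p => (p, f p)) := by
  by_cases h : b ≤ s
  · simp [PySem.List.pyRange_one_eq_nil h, PySem.List.enumerate_nil]
  · rw [PySem.List.pyRange_one_cons (by omega : s < b)]
    simp only [List.map_cons, PySem.List.enumerate_cons]
    rw [pvEnumerate_map_pyRange f (s + 1) b]
termination_by (b - s).toNat
decreasing_by omega

theorem pvInvariant (L : Int) (rows : List String) (g : Int → Int × Int) :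
    rows.foldl
      (fun counts number =>
        ((PySem.List.pyRange 0 L 1).zip counts).map
          (fun pc =>
            if PySem.List.pyGet? number.toList pc.1 == some '0' then (pc.2.1 + 1, pc.2.2)
            else (pc.2.1, pc.2.2 + 1)))
      ((PySem.List.pyRange 0 L 1).map g)
      = (PySem.List.pyRange 0 L 1).map (fun p => pvCnt rows (g p) p) := by
  induction rows generalizing g with
  | nil => simp [pvCnt]
  | cons v rest ih =>
    simp only [List.foldl_cons]
    have hzip := List.zip_map' (f := id) (g := g) (l := PySem.List.pyRange 0 L 1)
    simp only [List.map_id, id_eq] at hzip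
    rw [hzip, List.map_map]
    simp only [Function.comp_def]
    exact ih (fun p =>
      if PySem.List.pyGet? v.toList p == some '0' then ((g p).1 + 1, (g p).2)
      else ((g p).1, (g p).2 + 1))

theorem pvInit_eq_map (n : Nat) :
    List.replicate n ((0 : Int), (0 : Int))
      = (PySem.List.pyRange 0 (n : Int) 1).map (fun _ => ((0 : Int), (0 : Int))) := by
  rw [List.map_const', PySem.List.length_pyRange_one]
  congr 1

-- ===== VERDICT (by name: the statement is the Claim_ definition above) =====
theorem determineNumbers_spec : Claim_equal_determineNumbers := by
  intro data _ _
  unfold Spec_determineNumbers determineNumbers determineNumbers_alt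
  simp only [Int.toNat_natCast]
  rw [pvInit_eq_map, pvInvariant, pvEnumerate_map_pyRange]
  rw [PySem.Dict.items_foldl_insert_fresh
    (PySem.List.pyRange 0 ((PySem.List.pyGetD data 0 "").toList.length : Int) 1)
    (fun p => p) (fun p => pvCountOccurances data p) PySem.Dict.empty
    (by intro a _; simp)
    (by simpa using PySem.List.nodup_pyRange_one 0 ((PySem.List.pyGetD data 0 "").toList.length : Int))]
  simp [pvCnt_eq_countOccurances, PySem.Dict.empty]
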